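-- pv_equiv track=rewrite | github.com/nyctef/advent-of-code | 2023-python/day09.py | find_layers
-- ===== SOURCE A (Python) =====
-- def find_layers(nums: list[int]) -> list[list[int]]:
--     nums = nums.copy()
--     result = [nums]
--     while True:
--         next_layer = []
--         for i in range(1, len(nums)):
--             next_layer.append(nums[i] - nums[i - 1])
--         if all(x == 0 for x in next_layer):
--             break
--         result.append(next_layer)
--         nums = result[-1].copy()
--     return result
-- ===== SOURCE B (Python) =====
-- def find_layers(nums: list[int]) -> list[list[int]]:
--     diffs = [b - a for a, b in zip(nums, nums[1:])]
--     if all(x == 0 for x in diffs):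
--         return [nums.copy()]
--     return [nums.copy()] + find_layers(diffs)
-- ===== Notes on version B (the rewrite author's own statement) =====
-- stated objective: simpler
-- what changed: Replaces the while-loop with an accumulated result list by direct recursion on the one-pass zip-built difference list, returning [nums] in the base case and consing nums otherwise.
import Mathlib
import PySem

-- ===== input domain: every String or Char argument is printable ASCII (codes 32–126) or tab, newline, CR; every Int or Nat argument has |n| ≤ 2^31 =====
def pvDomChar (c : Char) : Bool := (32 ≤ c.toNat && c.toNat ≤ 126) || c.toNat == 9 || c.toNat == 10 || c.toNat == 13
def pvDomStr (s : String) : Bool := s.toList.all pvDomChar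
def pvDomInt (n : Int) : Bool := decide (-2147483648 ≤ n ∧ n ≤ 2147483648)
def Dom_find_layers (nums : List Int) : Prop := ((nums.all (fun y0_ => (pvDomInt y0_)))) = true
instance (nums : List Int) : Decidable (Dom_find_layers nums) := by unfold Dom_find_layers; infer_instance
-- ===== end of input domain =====

-- B replaces A's while-loop with an accumulator by direct recursion on the difference list (simpler decomposition).

-- ===== PORT A =====
-- length of the inner-loop-built next layer, cited by the termination proof
theorem pv_next_length (nums : List Int) :
    ((PySem.List.pyRange 1 (nums.length : Int) 1).foldl
      (fun acc i => acc ++ [PySem.List.pyGetD nums i 0 - PySem.List.pyGetD nums (i - 1) 0]) []).length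
      = nums.length - 1 := by
  rw [PySem.List.foldl_append_singleton_eq_map]
  simp [PySem.List.length_pyRange_one]

def find_layers_go (nums : List Int) (result : List (List Int)) : List (List Int) :=
  let next_layer := (PySem.List.pyRange 1 (nums.length : Int) 1).foldl
      (fun acc i => acc ++ [PySem.List.pyGetD nums i 0 - PySem.List.pyGetD nums (i - 1) 0]) []
  if next_layer.all (fun x => x == 0) then result
  else find_layers_go next_layer (result ++ [next_layer])
termination_by nums.length
decreasing_by
  rename_i h
  have hl : next_layer.length = nums.length - 1 := pv_next_length nums
  have hne : next_layer ≠ [] := by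
    intro hnil
    simp [hnil] at h
  have : 0 < next_layer.length := List.length_pos_of_ne_nil hne
  show next_layer.length < nums.length
  omega

def find_layers (nums : List Int) : List (List Int) :=
  find_layers_go nums [nums]

-- ===== PORT B =====
def find_layers_alt (nums : List Int) : List (List Int) :=
  let diffs := List.zipWith (fun a b => b - a) nums nums.tail
  if diffs.all (fun x => x == 0) then [nums]
  else nums :: find_layers_alt diffs
termination_by nums.length
decreasing_by
  rename_i h
  have hne : diffs ≠ [] := by
    intro hnil
    simp [hnil] at h
  have : 0 < diffs.length := List.length_pos_of_ne_nil hne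
  simp only [diffs, List.length_zipWith, List.length_tail] at *
  omega

-- ===== PRECONDITION & SPEC =====
def Spec_find_layers (nums : List Int) (out : List (List Int)) : Prop := out = find_layers_alt nums
instance (nums : List Int) (out : List (List Int)) : Decidable (Spec_find_layers nums out) := by unfold Spec_find_layers; infer_instance

-- ===== CLAIM (what is proved, stated in full; the proofs are below) =====
def Claim_equal_find_layers : Prop := ∀ (nums : List Int), Dom_find_layers nums → Spec_find_layers nums (find_layers nums)

-- ===== LEMMAS AND PROOFS =====

-- A's inner index loop builds exactly B's zip-of-adjacent-pairs difference list
theorem pv_next_eq_diffs (nums : List Int) :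
    (PySem.List.pyRange 1 (nums.length : Int) 1).foldl
      (fun acc i => acc ++ [PySem.List.pyGetD nums i 0 - PySem.List.pyGetD nums (i - 1) 0]) []
      = List.zipWith (fun a b => b - a) nums nums.tail := by
  rw [PySem.List.foldl_append_singleton_eq_map]
  apply List.ext_getElem
  · simp [PySem.List.length_pyRange_one, List.length_zipWith]
  · intro k h1 h2
    simp only [List.nil_append, List.getElem_map, PySem.List.getElem_pyRange_one,
      List.getElem_zipWith]
    have hlen : k + 1 < nums.length := by
      simp [List.length_zipWith, List.length_tail] at h2
      omega
    rw [PySem.List.pyGetD_eq_getElem _ _ (by omega) (by omega),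
        PySem.List.pyGetD_eq_getElem _ _ (by omega) (by omega)]
    have h1k : ((1 : Int) + k).toNat = k + 1 := by omega
    rw [List.getElem_tail]
    simp [h1k]

-- B always puts the input layer first
theorem pv_alt_cons (nums : List Int) :
    find_layers_alt nums = nums :: (find_layers_alt nums).tail := by
  rw [find_layers_alt]
  split <;> simp

-- loop invariant: the loop appends exactly the remaining layers of B's recursion
theorem pv_go_eq_aux (n : Nat) : ∀ (nums : List Int), nums.length ≤ n → ∀ (result : List (List Int)),
    find_layers_go nums result = result ++ (find_layers_alt nums).tail := by
  induction n with
  | zero =>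
    intro nums h result
    have hnil : nums = [] := List.eq_nil_of_length_eq_zero (by omega)
    subst hnil
    rw [find_layers_go]
    rw [find_layers_alt.eq_def]
    simp [PySem.List.pyRange_one_eq_nil]
  | succ n ih =>
    intro nums h result
    rw [find_layers_go]
    rw [find_layers_alt.eq_def]
    simp only [pv_next_eq_diffs]
    split
    · simp
    · rw [ih _ (by simp [List.length_zipWith, List.length_tail]; omega)]
      rw [pv_alt_cons (List.zipWith (fun a b => b - a) nums nums.tail)]
      simp

theorem pv_go_eq (nums : List Int) (result : List (List Int)) :
    find_layers_go nums result = result ++ (find_layers_alt nums).tail :=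
  pv_go_eq_aux nums.length nums le_rfl result

-- ===== VERDICT (by name: the statement is the Claim_ definition above) =====
theorem find_layers_spec : Claim_equal_find_layers := by
  intro nums _
  unfold Spec_find_layers find_layers
  rw [pv_go_eq]
  rw [pv_alt_cons nums]
  simp
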